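-- pv_equiv track=rewrite | github.com/Akshay-i95/edify-v3 | backend/llm_service.py | _find_edify_response_start
-- ===== SOURCE A (Python) =====
-- def _find_edify_response_start(text: str) -> int:
--     """Find where the Edify response starts in the text with improved detection"""
--     edify_patterns = [
--         "\n\nIn Edify schools",  # Most common pattern with double newline
--         "\nIn Edify schools",    # Single newline
--         "In Edify schools",      # Direct start
--         "\n\nOur policy",
--         "\nOur policy",
--         "Our policy",
--         "\n\nAt Edify",
--         "\nAt Edify",
--         "At Edify",
--         "\n\nIn Edify",
--         "\nIn Edify",
--         "In Edify",
--         "\n\nThe SOP number",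
--         "\nThe SOP number",
--         "The SOP number is",
--         "\n\n**Answer:**",
--         "\n**Answer:**",
--         "**Answer:**"
--     ]
--
--     earliest_match = float('inf')
--     earliest_pattern = None
--
--     for pattern in edify_patterns:
--         idx = text.find(pattern)
--         if idx >= 0 and idx < earliest_match:
--             earliest_match = idx
--             earliest_pattern = pattern
--
--     if earliest_match != float('inf'):
--         # Adjust for newlines in the pattern
--         if earliest_pattern.startswith('\n\n'):
--             return earliest_match + 2
--         elif earliest_pattern.startswith('\n'):
--             return earliest_match + 1
--         else:
--             return earliest_match
--
--     return -1
-- ===== SOURCE B (Python) =====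
-- def _find_edify_response_start(text: str) -> int:
--     """Earliest position where the response body itself begins: either a bare
--     pattern occurs there, or it follows a newline (position just after the '\n')."""
--     groups = [
--         ("\nIn Edify schools", "In Edify schools"),
--         ("\nOur policy", "Our policy"),
--         ("\nAt Edify", "At Edify"),
--         ("\nIn Edify", "In Edify"),
--         ("\nThe SOP number", "The SOP number is"),
--         ("\n**Answer:**", "**Answer:**"),
--     ]
--     starts = [text.find(bare) for _, bare in groups]
--     starts += [text.find(nl) + 1 for nl, _ in groups if nl in text]
--     return min((s for s in starts if s >= 0), default=-1)
-- ===== Notes on version B (the rewrite author's own statement) =====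
-- stated objective: simpler
-- what changed: Instead of scanning for all 18 patterns, tracking the raw-minimum with its winning pattern and then patching the index by the winner's leading-newline count, B searches only the 6 bare patterns plus the 6 single-newline-prefixed stems and returns the minimum of the already-adjusted start positions directly (a '\n\n' occurrence always contains a '\n' occurrence one position later with the same adjusted start).
import Mathlib
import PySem

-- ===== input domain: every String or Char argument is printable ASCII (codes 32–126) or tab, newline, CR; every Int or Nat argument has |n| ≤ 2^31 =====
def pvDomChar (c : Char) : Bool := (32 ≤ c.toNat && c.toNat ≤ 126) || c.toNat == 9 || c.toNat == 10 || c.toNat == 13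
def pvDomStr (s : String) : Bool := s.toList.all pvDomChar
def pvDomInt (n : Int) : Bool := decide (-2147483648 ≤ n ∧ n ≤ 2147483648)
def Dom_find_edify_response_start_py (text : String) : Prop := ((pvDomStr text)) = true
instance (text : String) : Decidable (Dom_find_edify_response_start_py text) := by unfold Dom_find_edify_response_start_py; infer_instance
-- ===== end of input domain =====

-- B replaces A's 18-pattern raw-index minimisation + offset fix-up by a direct minimum over the
-- adjusted start positions of 6 bare patterns and 6 newline-prefixed stems (objective: simpler).

-- ===== PORT A =====
def edifyPatterns : List String :=
  ["\n\nIn Edify schools", "\nIn Edify schools", "In Edify schools",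
   "\n\nOur policy", "\nOur policy", "Our policy",
   "\n\nAt Edify", "\nAt Edify", "At Edify",
   "\n\nIn Edify", "\nIn Edify", "In Edify",
   "\n\nThe SOP number", "\nThe SOP number", "The SOP number is",
   "\n\n**Answer:**", "\n**Answer:**", "**Answer:**"]

-- one step of A's loop; `float('inf')` / the unset pattern are modelled as `none`
-- (`idx < +inf` is always true, which is exactly `Option.all` on `none`)
def AStep (text : String) (acc : Option Int × Option String) (pattern : String) :
    Option Int × Option String :=
  let idx := PySem.Str.find text pattern
  if decide (0 ≤ idx) && acc.1.all (fun e => decide (idx < e)) then (some idx, some pattern)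
  else acc

def find_edify_response_start_py (text : String) : Int :=
  let st := edifyPatterns.foldl (AStep text) (none, none)
  match st.1, st.2 with
  | some earliest_match, some earliest_pattern =>
    if PySem.Str.startswith earliest_pattern "\n\n" then earliest_match + 2
    else if PySem.Str.startswith earliest_pattern "\n" then earliest_match + 1
    else earliest_match
  | _, _ => -1

-- ===== PORT B =====
def edifyGroups : List (String × String) :=
  [("\nIn Edify schools", "In Edify schools"),
   ("\nOur policy", "Our policy"),
   ("\nAt Edify", "At Edify"),
   ("\nIn Edify", "In Edify"),
   ("\nThe SOP number", "The SOP number is"),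
   ("\n**Answer:**", "**Answer:**")]

def find_edify_response_start_py_alt (text : String) : Int :=
  let starts := edifyGroups.map (fun g => PySem.Str.find text g.2)
  let starts := starts ++
    (edifyGroups.filter (fun g => PySem.Str.isIn g.1 text)).map
      (fun g => PySem.Str.find text g.1 + 1)
  PySem.List.minD (starts.filter (fun s => decide (0 ≤ s))) (fun s => s) (-1)

-- ===== PRECONDITION & SPEC =====
def Spec_find_edify_response_start_py (text : String) (out : Int) : Prop := out = find_edify_response_start_py_alt text
instance (text : String) (out : Int) : Decidable (Spec_find_edify_response_start_py text out) := by unfold Spec_find_edify_response_start_py; infer_instance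

-- ===== CLAIM (what is proved, stated in full; the proofs are below) =====
def Claim_equal_find_edify_response_start_py : Prop := ∀ (text : String), Dom_find_edify_response_start_py text → Spec_find_edify_response_start_py text (find_edify_response_start_py text)

-- ===== LEMMAS AND PROOFS =====

-- number of leading '\n' characters
def nlp : List Char → Nat
  | [] => 0
  | c :: r => if c = '\n' then nlp r + 1 else 0

theorem nlp_le_length (l : List Char) : nlp l ≤ l.length := by
  induction l with
  | nil => simp [nlp]
  | cons c r ih => by_cases h : c = '\n' <;> simp [nlp, h] <;> omega

theorem getElem?_nlp_lt (l : List Char) (t : Nat) (ht : t < nlp l) : l[t]? = some '\n' := by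
  induction l generalizing t with
  | nil => simp [nlp] at ht
  | cons c r ih =>
    by_cases h : c = '\n'
    · cases t with
      | zero => simp [h]
      | succ t' =>
        have ht' : t' < nlp r := by simp [nlp, h] at ht; omega
        simpa using ih t' ht'
    · simp [nlp, h] at ht

theorem getElem?_nlp_self (l : List Char) (h : nlp l < l.length) : l[nlp l]? ≠ some '\n' := by
  induction l with
  | nil => simp [nlp] at h
  | cons c r ih =>
    by_cases hc : c = '\n'
    · simp only [nlp, hc, if_pos rfl, reduceIte] at h ⊢
      simpa using ih (by simpa using h)
    · simp [nlp, hc]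

theorem getElem?_of_prefix_drop {cs p : List Char} {j : Nat}
    (h : p <+: cs.drop j) (t : Nat) (ht : t < p.length) : cs[j + t]? = p[t]? := by
  obtain ⟨r, hr⟩ := h
  rw [← List.getElem?_drop, ← hr, List.getElem?_append_left ht]

theorem find_le_of_prefix_drop (cs p : List Char) (j : Nat) (h : p <+: cs.drop j) :
    0 ≤ PySem.Chars.find cs p ∧ PySem.Chars.find cs p ≤ (j : Int) := by
  obtain ⟨r, hr⟩ := h
  have hinf : p <:+: cs := ⟨cs.take j, r, by rw [List.append_assoc, hr, List.take_append_drop]⟩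
  have h0 : 0 ≤ PySem.Chars.find cs p := (PySem.Chars.find_nonneg_iff cs p).2 hinf
  refine ⟨h0, ?_⟩
  by_contra hlt
  push_neg at hlt
  have := (PySem.Chars.find_spec h0).2 j (by omega)
  exact this ⟨r, hr⟩

theorem cons_prefix_drop {cs p : List Char} {c : Char} {j : Nat}
    (h : (c :: p) <+: cs.drop j) : p <+: cs.drop (j + 1) := by
  obtain ⟨r, hr⟩ := h
  refine ⟨r, ?_⟩
  have : cs.drop (j + 1) = (cs.drop j).drop 1 := by rw [List.drop_drop]
  rw [this, ← hr]
  simp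

theorem adj_core (cs : List Char) (m j kw kq : Nat) (hmj : m ≤ j) (hkw : kw ≤ 2)
    (hN : ∀ t, t < kw → cs[m + t]? = some '\n')
    (hq : kq ≤ 1 → cs[j + kq]? ≠ some '\n') : m + kw ≤ j + kq := by
  by_cases hok : m + kw ≤ j + kq
  · exact hok
  push_neg at hok
  have hkq : kq ≤ 1 := by omega
  have ht : j + kq - m < kw := by omega
  have h1 := hN (j + kq - m) ht
  have h2 : m + (j + kq - m) = j + kq := by omega
  rw [h2] at h1
  exact absurd h1 (hq hkq)

theorem adj_master (cs w q : List Char) (m : Int)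
    (hfw : PySem.Chars.find cs w = m) (h0m : 0 ≤ m)
    (hfq : 0 ≤ PySem.Chars.find cs q) (hmin : m ≤ PySem.Chars.find cs q)
    (hkw : nlp w ≤ 2) (hlq : nlp q < q.length) :
    m + (nlp w : Int) ≤ PySem.Chars.find cs q + (nlp q : Int) := by
  have h0w : 0 ≤ PySem.Chars.find cs w := by omega
  have hpw : w <+: cs.drop (PySem.Chars.find cs w).toNat := (PySem.Chars.find_spec h0w).1
  have hpq : q <+: cs.drop (PySem.Chars.find cs q).toNat := (PySem.Chars.find_spec hfq).1
  rw [hfw] at hpw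
  have key := adj_core cs m.toNat (PySem.Chars.find cs q).toNat (nlp w) (nlp q)
    (by omega) hkw
    (fun t ht => by
      rw [getElem?_of_prefix_drop hpw t (lt_of_lt_of_le ht (nlp_le_length w))]
      exact getElem?_nlp_lt w t ht)
    (fun _ => by
      rw [getElem?_of_prefix_drop hpq (nlp q) hlq]
      exact getElem?_nlp_self q hlq)
  omega

-- A's loop invariant
def AInv (text : String) (S : List String) (acc : Option Int × Option String) : Prop :=
  (acc = (none, none) ∧ ∀ q ∈ S, PySem.Str.find text q < 0) ∨
  (∃ m w, acc = (some m, some w) ∧ w ∈ S ∧ PySem.Str.find text w = m ∧ 0 ≤ m ∧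
    ∀ q ∈ S, 0 ≤ PySem.Str.find text q → m ≤ PySem.Str.find text q)

theorem AInv_step (text : String) (S : List String) (acc : Option Int × Option String)
    (p : String) (h : AInv text S acc) : AInv text (S ++ [p]) (AStep text acc p) := by
  rcases h with ⟨hacc, hall⟩ | ⟨m, w, hacc, hw, hFw, h0m, hmin⟩
  · subst hacc
    unfold AStep
    by_cases h0 : 0 ≤ PySem.Str.find text p
    · simp only [Option.all_none, Bool.and_true, decide_eq_true_eq, if_pos h0]
      refine Or.inr ⟨PySem.Str.find text p, p, rfl, by simp, rfl, h0, ?_⟩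
      intro q hq hq0
      rcases List.mem_append.1 hq with hq | hq
      · exact absurd hq0 (by have := hall q hq; omega)
      · simp at hq; subst hq; rfl
    · simp only [Option.all_none, Bool.and_true, decide_eq_true_eq, if_neg h0]
      refine Or.inl ⟨rfl, ?_⟩
      intro q hq
      rcases List.mem_append.1 hq with hq | hq
      · exact hall q hq
      · simp at hq; subst hq; omega
  · subst hacc
    unfold AStep
    by_cases hc : 0 ≤ PySem.Str.find text p ∧ PySem.Str.find text p < m
    · rw [if_pos (by
        simp only [Option.all_some, Bool.and_eq_true, decide_eq_true_eq]
        exact ⟨hc.1, hc.2⟩)]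
      refine Or.inr ⟨PySem.Str.find text p, p, rfl, by simp, rfl, hc.1, ?_⟩
      intro q hq hq0
      rcases List.mem_append.1 hq with hq | hq
      · have := hmin q hq hq0; omega
      · simp at hq; subst hq; rfl
    · rw [if_neg (by simp only [Option.all_some, Bool.and_eq_true, decide_eq_true_eq]; tauto)]
      refine Or.inr ⟨m, w, rfl, List.mem_append.2 (Or.inl hw), hFw, h0m, ?_⟩
      intro q hq hq0
      rcases List.mem_append.1 hq with hq | hq
      · exact hmin q hq hq0
      · simp at hq; subst hq
        push_neg at hc
        have := hc hq0; omega

theorem AInv_fold (text : String) (ps : List String) :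
    ∀ (S : List String) (acc : Option Int × Option String), AInv text S acc →
    AInv text (S ++ ps) (ps.foldl (AStep text) acc) := by
  induction ps with
  | nil => intro S acc h; simpa using h
  | cons p tl ih =>
    intro S acc h
    have h1 := AInv_step text S acc p h
    have h2 := ih (S ++ [p]) (AStep text acc p) h1
    simpa [List.append_assoc] using h2

theorem AInv_patterns (text : String) :
    AInv text edifyPatterns (edifyPatterns.foldl (AStep text) (none, none)) := by
  have := AInv_fold text edifyPatterns [] (none, none) (Or.inl ⟨rfl, by simp⟩)
  simpa using this

-- B's candidate list (proof-side restatement of B's lets)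
def bFiltered (text : String) : List Int :=
  ((edifyGroups.map (fun g => PySem.Str.find text g.2)) ++
    (edifyGroups.filter (fun g => PySem.Str.isIn g.1 text)).map
      (fun g => PySem.Str.find text g.1 + 1)).filter (fun s => decide (0 ≤ s))

theorem alt_eq (text : String) :
    find_edify_response_start_py_alt text = PySem.List.minD (bFiltered text) (fun s => s) (-1) := rfl

theorem mem_bFiltered (text : String) (y : Int) :
    y ∈ bFiltered text ↔ 0 ≤ y ∧
      ((∃ g ∈ edifyGroups, y = PySem.Str.find text g.2) ∨
       (∃ g ∈ edifyGroups, PySem.Str.isIn g.1 text = true ∧ y = PySem.Str.find text g.1 + 1)) := by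
  simp only [bFiltered, List.mem_filter, List.mem_append, List.mem_map, List.mem_filter,
    decide_eq_true_eq]
  constructor
  · rintro ⟨h1, h2⟩
    refine ⟨h2, ?_⟩
    rcases h1 with ⟨g, hg, hy⟩ | ⟨g, ⟨hg, hin⟩, hy⟩
    · exact Or.inl ⟨g, hg, hy.symm⟩
    · exact Or.inr ⟨g, hg, hin, hy.symm⟩
  · rintro ⟨h0, ⟨g, hg, hy⟩ | ⟨g, hg, hin, hy⟩⟩
    · exact ⟨Or.inl ⟨g, hg, hy.symm⟩, h0⟩
    · exact ⟨Or.inr ⟨g, ⟨hg, hin⟩, hy.symm⟩, h0⟩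

theorem minD_eq_of (l : List Int) (v : Int) (h1 : v ∈ l) (h2 : ∀ x ∈ l, v ≤ x) :
    PySem.List.minD l (fun s => s) (-1) = v := by
  unfold PySem.List.minD
  cases hm : PySem.List.min? l (fun s => s) with
  | none => rw [PySem.List.min?_eq_none_iff] at hm; subst hm; cases h1
  | some m =>
    have hmem := PySem.List.min?_mem hm
    have hle := PySem.List.min?_isMin hm v h1
    have hge := h2 m hmem
    simp only [Option.getD_some]
    omega

-- decide-checked facts about the literal pattern lists
theorem nlp_patterns : ∀ w ∈ edifyPatterns, nlp w.toList ≤ 2 := by decide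

theorem group_facts : ∀ g ∈ edifyGroups,
    g.1 ∈ edifyPatterns ∧ g.2 ∈ edifyPatterns ∧
    nlp g.1.toList = 1 ∧ nlp g.2.toList = 0 ∧
    nlp g.1.toList < g.1.toList.length ∧ nlp g.2.toList < g.2.toList.length ∧
    PySem.Str.startswith g.2 "\n\n" = false ∧ PySem.Str.startswith g.2 "\n" = false ∧
    PySem.Str.startswith g.1 "\n\n" = false ∧ PySem.Str.startswith g.1 "\n" = true := by decide

theorem pattern_shape : ∀ w ∈ edifyPatterns, ∃ g ∈ edifyGroups,
    w = g.2 ∨ w = g.1 ∨ w.toList = '\n' :: g.1.toList := by decide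

-- all elements of B's filtered candidate list are ≥ the winner's adjusted position
theorem upper_bound (text w : String) (m : Int) (hw : w ∈ edifyPatterns)
    (hFw : PySem.Str.find text w = m) (h0m : 0 ≤ m)
    (hmin : ∀ q ∈ edifyPatterns, 0 ≤ PySem.Str.find text q → m ≤ PySem.Str.find text q) :
    ∀ x ∈ bFiltered text, m + (nlp w.toList : Int) ≤ x := by
  intro x hx
  rw [mem_bFiltered] at hx
  obtain ⟨h0x, hsrc⟩ := hx
  rw [PySem.Str.find_eq] at hFw
  rcases hsrc with ⟨g, hg, hy⟩ | ⟨g, hg, hin, hy⟩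
  · obtain ⟨_, hg2, _, hnl2, _, hlen2, _⟩ := group_facts g hg
    subst hy
    rw [PySem.Str.find_eq] at h0x ⊢
    have hm2 := hmin g.2 hg2 (by rw [PySem.Str.find_eq]; exact h0x)
    rw [PySem.Str.find_eq] at hm2
    have := adj_master text.toList w.toList g.2.toList m hFw h0m h0x hm2
      (nlp_patterns w hw) hlen2
    omega
  · obtain ⟨hg1, _, hnl1, _, hlen1, _⟩ := group_facts g hg
    subst hy
    have h0q : 0 ≤ PySem.Chars.find text.toList g.1.toList := by
      rw [PySem.Chars.find_nonneg_iff]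
      exact (PySem.Str.isIn_iff_infix g.1 text).1 hin
    have hm1 := hmin g.1 hg1 (by rw [PySem.Str.find_eq]; exact h0q)
    rw [PySem.Str.find_eq] at hm1
    have := adj_master text.toList w.toList g.1.toList m hFw h0m h0q hm1
      (nlp_patterns w hw) hlen1
    rw [PySem.Str.find_eq]
    omega

-- membership helpers for the three winner shapes
theorem mem_bare (text : String) (g : String × String) (hg : g ∈ edifyGroups) (m : Int)
    (hf : PySem.Str.find text g.2 = m) (h0 : 0 ≤ m) : m ∈ bFiltered text := by
  rw [mem_bFiltered]
  exact ⟨h0, Or.inl ⟨g, hg, hf.symm⟩⟩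

theorem mem_nl (text : String) (g : String × String) (hg : g ∈ edifyGroups) (m : Int)
    (hf : PySem.Str.find text g.1 = m) (h0 : 0 ≤ m) : m + 1 ∈ bFiltered text := by
  rw [mem_bFiltered]
  refine ⟨by omega, Or.inr ⟨g, hg, ?_, by rw [hf]⟩⟩
  rw [PySem.Str.isIn_iff_infix, ← PySem.Chars.find_nonneg_iff, ← PySem.Str.find_eq, hf]
  exact h0

theorem exists_cand_nlnl (text : String) (g : String × String) (hg : g ∈ edifyGroups) (m : Int)
    (h0m : 0 ≤ m) (hpre : g.1.toList <+: text.toList.drop (m.toNat + 1)) :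
    ∃ x ∈ bFiltered text, x ≤ m + 2 := by
  obtain ⟨h0f, hlef⟩ := find_le_of_prefix_drop text.toList g.1.toList (m.toNat + 1) hpre
  refine ⟨PySem.Str.find text g.1 + 1, ?_, ?_⟩
  · exact mem_nl text g hg (PySem.Str.find text g.1) rfl (by rw [PySem.Str.find_eq]; exact h0f)
  · rw [PySem.Str.find_eq]; omega

-- ===== VERDICT (by name: the statement is the Claim_ definition above) =====
theorem find_edify_response_start_py_spec : Claim_equal_find_edify_response_start_py := by
  intro text _
  unfold Spec_find_edify_response_start_py
  have hInv := AInv_patterns text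
  rcases hInv with ⟨hacc, hall⟩ | ⟨m, w, hacc, hw, hFw, h0m, hmin⟩
  · -- no pattern occurs: both sides are -1
    have hA : find_edify_response_start_py text = -1 := by
      unfold find_edify_response_start_py
      rw [hacc]
    have hempty : bFiltered text = [] := by
      rw [List.eq_nil_iff_forall_not_mem]
      intro x hx
      rw [mem_bFiltered] at hx
      obtain ⟨h0x, hsrc⟩ := hx
      rcases hsrc with ⟨g, hg, hy⟩ | ⟨g, hg, hin, hy⟩
      · obtain ⟨_, hg2, _⟩ := group_facts g hg
        have := hall g.2 hg2
        omega
      · obtain ⟨hg1, _⟩ := group_facts g hg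
        have hlt := hall g.1 hg1
        have h0q : 0 ≤ PySem.Str.find text g.1 := by
          rw [PySem.Str.find_eq, PySem.Chars.find_nonneg_iff]
          exact (PySem.Str.isIn_iff_infix g.1 text).1 hin
        omega
    rw [hA, alt_eq, hempty]
    rfl
  · -- winner w at raw index m
    obtain ⟨g, hg, hcase⟩ := pattern_shape w hw
    obtain ⟨hg1p, hg2p, hnl1, hnl2, hlen1, hlen2, hsw2a, hsw2b, hsw1a, hsw1b⟩ := group_facts g hg
    have hupper := upper_bound text w m hw hFw h0m hmin
    rcases hcase with rfl | rfl | hcons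
    · -- bare pattern: offset 0
      have hA : find_edify_response_start_py text = m := by
        simp only [find_edify_response_start_py, hacc, hsw2a, hsw2b]
        simp
      rw [hA, alt_eq]
      rw [minD_eq_of (bFiltered text) m (mem_bare text g hg m hFw h0m)
        (fun x hx => by have := hupper x hx; rw [hnl2] at this; simpa using this)]
    · -- "\n"-prefixed stem: offset 1
      have hA : find_edify_response_start_py text = m + 1 := by
        simp only [find_edify_response_start_py, hacc, hsw1a, hsw1b]
        simp
      rw [hA, alt_eq]
      rw [minD_eq_of (bFiltered text) (m + 1) (mem_nl text g hg m hFw h0m)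
        (fun x hx => by have := hupper x hx; rw [hnl1] at this; push_cast at this; omega)]
    · -- "\n\n"-prefixed stem: offset 2
      have hnlw : nlp w.toList = 2 := by
        rw [hcons]
        simp [nlp, hnl1]
      have hsw : PySem.Str.startswith w "\n\n" = true := by
        rw [PySem.Str.startswith_eq, PySem.Chars.startswith_iff, hcons]
        obtain ⟨r, hr⟩ := (PySem.Chars.startswith_iff g.1.toList "\n".toList).1
          (by rw [← PySem.Str.startswith_eq]; exact hsw1b)
        refine ⟨r, ?_⟩
        simp only [show ("\n\n" : String).toList = ['\n', '\n'] from rfl] at *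
        simp only [show ("\n" : String).toList = ['\n'] from rfl] at hr
        rw [← hr]
        rfl
      have hA : find_edify_response_start_py text = m + 2 := by
        simp only [find_edify_response_start_py, hacc, hsw]
        simp
      -- extract the candidate find(g.1) + 1 ≤ m + 2
      have h0w : 0 ≤ PySem.Chars.find text.toList w.toList := by
        rw [← PySem.Str.find_eq, hFw]; exact h0m
      have hpw := (PySem.Chars.find_spec h0w).1
      rw [PySem.Str.find_eq] at hFw
      rw [hFw] at hpw
      rw [hcons] at hpw
      have hpre := cons_prefix_drop hpw
      obtain ⟨x, hxmem, hxle⟩ := exists_cand_nlnl text g hg m h0m hpre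
      have hxge := hupper x hxmem
      rw [hnlw] at hxge
      have hx : x = m + 2 := by push_cast at hxge; omega
      rw [hA, alt_eq]
      rw [minD_eq_of (bFiltered text) x hxmem (fun y hy => by
        have := hupper y hy; rw [hnlw] at this; push_cast at this; omega)]
      omega
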